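-- pv_equiv track=rewrite | github.com/Perfect29/AI-Visibility | backend/app/api/routes.py | generate_fallback_keywords
-- ===== SOURCE A (Python) =====
-- from typing import List
--
-- def generate_fallback_keywords(brand_name: str) -> List[str]:
--     """Generate fallback keywords when scraping fails"""
--     # Common business keywords based on brand name
--     fallback_keywords = [
--         "Business solutions",
--         "Technology services",
--         "Digital platform",
--         "Enterprise software",
--         "Online services"
--     ]
--
--     # Try to infer from brand name
--     brand_lower = brand_name.lower()
--     if any(word in brand_lower for word in ["pay", "payment", "stripe"]):
--         return ["Payments", "Billing", "Financial services", "E-commerce", "Online transactions"]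
--     elif any(word in brand_lower for word in ["tech", "software", "app"]):
--         return ["Software", "Technology", "Applications", "Digital solutions", "Platform"]
--     elif any(word in brand_lower for word in ["university", "education", "school"]):
--         return ["Education", "Learning", "Academic services", "Student platform", "Online learning"]
--     elif any(word in brand_lower for word in ["bank", "finance", "money"]):
--         return ["Banking", "Financial services", "Money management", "Investment", "Fintech"]
--     else:
--         return fallback_keywords
-- ===== SOURCE B (Python) =====
-- from typing import List
--
-- # flat multi-pattern table: (trigger, rule index)
-- TRIGGERS = [
--     ("pay", 0), ("payment", 0), ("stripe", 0),
--     ("tech", 1), ("software", 1), ("app", 1),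
--     ("university", 2), ("education", 2), ("school", 2),
--     ("bank", 3), ("finance", 3), ("money", 3),
-- ]
--
-- OUTPUTS = [
--     ["Payments", "Billing", "Financial services", "E-commerce", "Online transactions"],
--     ["Software", "Technology", "Applications", "Digital solutions", "Platform"],
--     ["Education", "Learning", "Academic services", "Student platform", "Online learning"],
--     ["Banking", "Financial services", "Money management", "Investment", "Fintech"],
-- ]
--
-- DEFAULT = [
--     "Business solutions",
--     "Technology services",
--     "Digital platform",
--     "Enterprise software",
--     "Online services",
-- ]
--
--
-- def generate_fallback_keywords(brand_name: str) -> List[str]: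
--     """Generate fallback keywords when scraping fails.
--
--     Single sweep over the lowered text: at every suffix a naive
--     multi-pattern prefix matcher records the minimal (= highest
--     priority) matching rule index; the answer is looked up at the end.
--     """
--     t = brand_name.lower()
--     best = 4
--     while t:
--         b = 4
--         for trig, ri in TRIGGERS:
--             if t.startswith(trig) and ri < b:
--                 b = ri
--         if b < best:
--             best = b
--         t = t[1:]
--     return list(OUTPUTS[best]) if best < 4 else list(DEFAULT)
-- ===== Notes on version B (the rewrite author's own statement) =====
-- stated objective: alternative
-- what changed: Instead of A's ordered if/elif cascade of substring tests per rule, B makes one sweep over the lowered text, running a naive multi-pattern prefix matcher at every suffix to record the minimal (highest-priority) matching rule index, and looks the answer up at the end.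
import Mathlib
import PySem

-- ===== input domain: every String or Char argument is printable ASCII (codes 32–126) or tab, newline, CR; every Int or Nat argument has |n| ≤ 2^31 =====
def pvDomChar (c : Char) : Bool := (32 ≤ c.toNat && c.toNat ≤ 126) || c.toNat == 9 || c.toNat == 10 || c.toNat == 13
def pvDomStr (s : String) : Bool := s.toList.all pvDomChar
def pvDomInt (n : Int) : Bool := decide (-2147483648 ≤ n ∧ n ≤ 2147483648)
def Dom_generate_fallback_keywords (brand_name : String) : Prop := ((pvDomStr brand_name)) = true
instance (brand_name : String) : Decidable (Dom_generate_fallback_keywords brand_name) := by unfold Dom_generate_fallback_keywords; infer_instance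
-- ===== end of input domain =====

-- B replaces A's if/elif cascade of substring tests by one sweep over the text with a
-- multi-pattern prefix matcher keeping the minimal matching rule index (objective: alternative).

-- ===== PORT A =====
def generate_fallback_keywords (brand_name : String) : List String :=
  let fallback_keywords : List String :=
    ["Business solutions", "Technology services", "Digital platform",
     "Enterprise software", "Online services"]
  let brand_lower := PySem.Str.lower brand_name
  if (["pay", "payment", "stripe"].any (fun word => PySem.Str.isIn word brand_lower)) then
    ["Payments", "Billing", "Financial services", "E-commerce", "Online transactions"]
  else if (["tech", "software", "app"].any (fun word => PySem.Str.isIn word brand_lower)) then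
    ["Software", "Technology", "Applications", "Digital solutions", "Platform"]
  else if (["university", "education", "school"].any (fun word => PySem.Str.isIn word brand_lower)) then
    ["Education", "Learning", "Academic services", "Student platform", "Online learning"]
  else if (["bank", "finance", "money"].any (fun word => PySem.Str.isIn word brand_lower)) then
    ["Banking", "Financial services", "Money management", "Investment", "Fintech"]
  else
    fallback_keywords

-- ===== PORT B =====
-- flat multi-pattern table: (trigger, rule index)
def pvTriggers : List (List Char × Nat) :=
  [("pay".toList, 0), ("payment".toList, 0), ("stripe".toList, 0),
   ("tech".toList, 1), ("software".toList, 1), ("app".toList, 1),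
   ("university".toList, 2), ("education".toList, 2), ("school".toList, 2),
   ("bank".toList, 3), ("finance".toList, 3), ("money".toList, 3)]

def pvOutputs : List (List String) :=
  [["Payments", "Billing", "Financial services", "E-commerce", "Online transactions"],
   ["Software", "Technology", "Applications", "Digital solutions", "Platform"],
   ["Education", "Learning", "Academic services", "Student platform", "Online learning"],
   ["Banking", "Financial services", "Money management", "Investment", "Fintech"]]

def pvDefault : List String :=
  ["Business solutions", "Technology services", "Digital platform",
   "Enterprise software", "Online services"]

-- inner for-loop: minimal rule index whose trigger is a prefix of t (4 = none)
def pvHit (t : List Char) : Nat :=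
  pvTriggers.foldl
    (fun b tr => if PySem.Chars.startswith t tr.1 ∧ tr.2 < b then tr.2 else b) 4

-- while-loop over the suffixes t, t[1:], …, carrying the accumulator best
def pvScanAcc : List Char → Nat → Nat
  | [], best => best
  | c :: rest, best =>
      let b := pvHit (c :: rest)
      pvScanAcc rest (if b < best then b else best)

def generate_fallback_keywords_alt (brand_name : String) : List String :=
  let t := PySem.Str.lower brand_name
  let best := pvScanAcc t.toList 4
  if best < 4 then pvOutputs.getD best [] else pvDefault

-- ===== PRECONDITION & SPEC =====
def Spec_generate_fallback_keywords (brand_name : String) (out : List String) : Prop := out = generate_fallback_keywords_alt brand_name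
instance (brand_name : String) (out : List String) : Decidable (Spec_generate_fallback_keywords brand_name out) := by unfold Spec_generate_fallback_keywords; infer_instance

-- ===== CLAIM =====
def Claim_equal_generate_fallback_keywords : Prop := ∀ (brand_name : String), Dom_generate_fallback_keywords brand_name → Spec_generate_fallback_keywords brand_name (generate_fallback_keywords brand_name)

-- ===== LEMMAS AND PROOFS =====

-- non-accumulator form of the scan, used only by the proof
def pvScanSuffix : List Char → Nat
  | [] => 4
  | c :: rest => min (pvHit (c :: rest)) (pvScanSuffix rest)

lemma pvScanAcc_eq_min (L : List Char) : ∀ best, best ≤ 4 → pvScanAcc L best = min (pvScanSuffix L) best := by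
  induction L with
  | nil => intro best h; simp only [pvScanAcc, pvScanSuffix]; omega
  | cons c rest ih =>
      intro best h
      simp only [pvScanAcc, pvScanSuffix]
      rw [ih _ (by split_ifs <;> omega)]
      split_ifs <;> omega

lemma pvIsIn_cons (t : List Char) (c : Char) (rest : List Char) :
    PySem.Chars.isIn t (c :: rest) =
      (PySem.Chars.startswith (c :: rest) t || PySem.Chars.isIn t rest) := by
  rw [Bool.eq_iff_iff]
  simp [PySem.Chars.isIn_iff_infix, PySem.Chars.startswith_iff, List.infix_cons_iff]

-- the four per-rule "any trigger occurs" conditions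
def pvCond (ws : List (List Char)) (L : List Char) : Bool :=
  ws.any (fun w => PySem.Chars.isIn w L)

lemma pvCond_cons (ws : List (List Char)) (c : Char) (rest : List Char) :
    pvCond ws (c :: rest) =
      (ws.any (fun w => PySem.Chars.startswith (c :: rest) w) || pvCond ws rest) := by
  induction ws with
  | nil => simp [pvCond]
  | cons w ws ih =>
      simp only [pvCond, List.any_cons, pvIsIn_cons] at *
      rw [ih]
      simp [Bool.or_assoc, Bool.or_comm, Bool.or_left_comm]

def pvCascade (L : List Char) : Nat :=
  if pvCond ["pay".toList, "payment".toList, "stripe".toList] L then 0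
  else if pvCond ["tech".toList, "software".toList, "app".toList] L then 1
  else if pvCond ["university".toList, "education".toList, "school".toList] L then 2
  else if pvCond ["bank".toList, "finance".toList, "money".toList] L then 3
  else 4

-- minimal rule index among triggers in trs that are a prefix of t (4 = none)
def pvMM (t : List Char) : List (List Char × Nat) → Nat
  | [] => 4
  | tr :: trs => if PySem.Chars.startswith t tr.1 then min tr.2 (pvMM t trs) else pvMM t trs

lemma pvMM_le (t : List Char) (trs : List (List Char × Nat)) : pvMM t trs ≤ 4 := by
  induction trs with
  | nil => simp [pvMM]
  | cons tr trs ih => simp only [pvMM]; split_ifs <;> omega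

lemma pvMM_cons_min (t : List Char) (tr : List Char × Nat) (trs : List (List Char × Nat)) :
    pvMM t (tr :: trs) = min (if PySem.Chars.startswith t tr.1 then tr.2 else 4) (pvMM t trs) := by
  have h := pvMM_le t trs
  simp only [pvMM]; split_ifs <;> omega

lemma pvFold_eq (t : List Char) (trs : List (List Char × Nat)) : ∀ b, b ≤ 4 →
    trs.foldl (fun b tr => if PySem.Chars.startswith t tr.1 ∧ tr.2 < b then tr.2 else b) b
      = min b (pvMM t trs) := by
  induction trs with
  | nil => intro b hb; simp [pvMM]; omega
  | cons tr trs ih =>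
      intro b hb
      simp only [List.foldl_cons, pvMM]
      rw [ih _ (by split_ifs <;> omega)]
      split_ifs <;> simp_all <;> omega

set_option maxHeartbeats 4000000 in
lemma pvHit_eq (t : List Char) :
    pvHit t =
      if ["pay".toList, "payment".toList, "stripe".toList].any (fun w => PySem.Chars.startswith t w) then 0
      else if ["tech".toList, "software".toList, "app".toList].any (fun w => PySem.Chars.startswith t w) then 1
      else if ["university".toList, "education".toList, "school".toList].any (fun w => PySem.Chars.startswith t w) then 2
      else if ["bank".toList, "finance".toList, "money".toList].any (fun w => PySem.Chars.startswith t w) then 3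
      else 4 := by
  have h : pvHit t = min 4 (pvMM t pvTriggers) := pvFold_eq t pvTriggers 4 (le_refl 4)
  rw [h]
  simp only [pvTriggers, pvMM_cons_min, pvMM, List.any_cons, List.any_nil, Bool.or_false]
  generalize PySem.Chars.startswith t "pay".toList = p0
  generalize PySem.Chars.startswith t "payment".toList = p1
  generalize PySem.Chars.startswith t "stripe".toList = p2
  generalize PySem.Chars.startswith t "tech".toList = p3
  generalize PySem.Chars.startswith t "software".toList = p4
  generalize PySem.Chars.startswith t "app".toList = p5
  generalize PySem.Chars.startswith t "university".toList = p6
  generalize PySem.Chars.startswith t "education".toList = p7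
  generalize PySem.Chars.startswith t "school".toList = p8
  generalize PySem.Chars.startswith t "bank".toList = p9
  generalize PySem.Chars.startswith t "finance".toList = p10
  generalize PySem.Chars.startswith t "money".toList = p11
  revert p0 p1 p2 p3 p4 p5 p6 p7 p8 p9 p10 p11
  decide

set_option maxHeartbeats 4000000 in
lemma pvCascade_le (L : List Char) : pvCascade L ≤ 4 := by
  unfold pvCascade; split_ifs <;> omega

lemma pvScanSuffix_eq (L : List Char) : pvScanSuffix L = pvCascade L := by
  induction L with
  | nil => decide
  | cons c rest ih =>
      simp only [pvScanSuffix, ih, pvHit_eq, pvCascade, pvCond_cons]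
      generalize List.any ["pay".toList, "payment".toList, "stripe".toList] (fun w => PySem.Chars.startswith (c :: rest) w) = a0
      generalize List.any ["tech".toList, "software".toList, "app".toList] (fun w => PySem.Chars.startswith (c :: rest) w) = a1
      generalize List.any ["university".toList, "education".toList, "school".toList] (fun w => PySem.Chars.startswith (c :: rest) w) = a2
      generalize List.any ["bank".toList, "finance".toList, "money".toList] (fun w => PySem.Chars.startswith (c :: rest) w) = a3
      generalize pvCond ["pay".toList, "payment".toList, "stripe".toList] rest = q0
      generalize pvCond ["tech".toList, "software".toList, "app".toList] rest = q1
      generalize pvCond ["university".toList, "education".toList, "school".toList] rest = q2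
      generalize pvCond ["bank".toList, "finance".toList, "money".toList] rest = q3
      revert a0 a1 a2 a3 q0 q1 q2 q3
      decide

-- ===== VERDICT =====
theorem generate_fallback_keywords_spec : Claim_equal_generate_fallback_keywords := by
  intro brand_name _
  unfold Spec_generate_fallback_keywords generate_fallback_keywords generate_fallback_keywords_alt
  dsimp only
  rw [pvScanAcc_eq_min _ 4 (le_refl 4), pvScanSuffix_eq,
    Nat.min_eq_left (pvCascade_le _)]
  simp only [pvCascade, pvCond, List.any_cons, List.any_nil, Bool.or_false,
    PySem.Str.isIn_eq]
  split_ifs <;> first | rfl | omega
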